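-- pv_equiv track=rewrite | github.com/TrungXibia/soicausieuga | app.py | isStraightMod10AnyOrder
-- ===== SOURCE A (Python) =====
-- def isStraightMod10AnyOrder(d):
--     if not isinstance(d, list) or len(d) != 5: return False
--     s = set(d)
--     if len(s) != 5: return False
--     for b in range(10):
--         ok = True
--         for i in range(5):
--             if (b + i) % 10 not in s:
--                 ok = False
--                 break
--         if ok: return True
--     return False
-- ===== SOURCE B (Python) =====
-- def isStraightMod10AnyOrder(d):
--     if not isinstance(d, list) or len(d) != 5: return False
--     if len(set(d)) != 5: return False
--     if any(x < 0 or x > 9 for x in d): return False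
--     s = sorted(d)
--     gaps = [s[i + 1] - s[i] for i in range(4)] + [10 - s[4] + s[0]]
--     return sorted(gaps) == [1, 1, 1, 1, 6]
-- ===== Notes on version B (the rewrite author's own statement) =====
-- stated objective: alternative
-- what changed: Replaces the scan over all 10 candidate start bases (each with an inner membership loop) by a closed-form check: sort the five distinct digits, require them in 0..9, and test that the multiset of circular gaps (four consecutive differences plus the wrap gap) is exactly {1,1,1,1,6}.
import Mathlib
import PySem

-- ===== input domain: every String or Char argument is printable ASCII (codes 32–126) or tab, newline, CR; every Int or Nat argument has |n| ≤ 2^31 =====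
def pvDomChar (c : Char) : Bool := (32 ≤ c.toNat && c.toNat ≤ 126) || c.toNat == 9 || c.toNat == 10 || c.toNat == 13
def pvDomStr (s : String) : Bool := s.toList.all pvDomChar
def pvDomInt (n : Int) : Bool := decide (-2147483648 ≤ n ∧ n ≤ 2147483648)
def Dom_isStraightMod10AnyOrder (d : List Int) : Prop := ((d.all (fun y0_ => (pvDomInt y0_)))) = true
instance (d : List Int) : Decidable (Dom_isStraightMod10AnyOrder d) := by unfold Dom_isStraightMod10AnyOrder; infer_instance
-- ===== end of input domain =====

-- B replaces A's scan over all 10 candidate start bases by a closed-form check on the sorted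
-- digits: five distinct values in 0..9 whose five circular gaps form the multiset {1,1,1,1,6}
-- (objective: alternative).

-- ===== PORT A =====
def isStraightMod10AnyOrder (d : List Int) : Bool :=
  -- 'isinstance(d, list)' is always true under the type convention
  if d.length ≠ 5 then false
  else
    let s : PySem.Set Int := PySem.Set.ofList d
    if PySem.Set.len s ≠ 5 then false
    else
      -- 'for b in range(10): ok = (inner loop with break); if ok: return True' / final 'return False'
      (PySem.List.pyRange 0 10 1).any (fun b =>
        (PySem.List.pyRange 0 5 1).all (fun i =>
          PySem.Set.contains s (PySem.Int.mod (b + i) 10)))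

-- ===== PORT B =====
def isStraightMod10AnyOrder_alt (d : List Int) : Bool :=
  if d.length ≠ 5 then false
  else if PySem.Set.len (PySem.Set.ofList d) ≠ 5 then false
  else if d.any (fun x => decide (x < 0) || decide (x > 9)) then false
  else
    let s := PySem.List.sorted d (fun x => x) false
    let gaps := (PySem.List.pyRange 0 4 1).map
        (fun i => PySem.List.pyGetD s (i + 1) 0 - PySem.List.pyGetD s i 0)
      ++ [10 - PySem.List.pyGetD s 4 0 + PySem.List.pyGetD s 0 0]
    PySem.List.sorted gaps (fun x => x) false == [1, 1, 1, 1, 6]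

-- ===== PRECONDITION & SPEC =====
def Spec_isStraightMod10AnyOrder (d : List Int) (out : Bool) : Prop := out = isStraightMod10AnyOrder_alt d
instance (d : List Int) (out : Bool) : Decidable (Spec_isStraightMod10AnyOrder d out) := by unfold Spec_isStraightMod10AnyOrder; infer_instance

-- ===== CLAIM (what is proved, stated in full; the proofs are below) =====
def Claim_equal_isStraightMod10AnyOrder : Prop := ∀ (d : List Int), Dom_isStraightMod10AnyOrder d → Spec_isStraightMod10AnyOrder d (isStraightMod10AnyOrder d)

-- ===== LEMMAS AND PROOFS =====

-- set(d) has as many elements as d iff d has no duplicates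
lemma pvOfListLen (xs : List Int) : (PySem.Set.ofList xs).length = xs.length ↔ xs.Nodup := by
  have hperm : (PySem.Set.ofList xs).Perm xs.dedup :=
    (List.perm_ext_iff_of_nodup (PySem.Set.nodup_ofList xs) (List.nodup_dedup xs)).2
      (fun x => by simp [PySem.Set.mem_ofList, List.mem_dedup])
  rw [hperm.length_eq]
  constructor
  · intro h
    have hde : xs.dedup = xs := (List.dedup_sublist xs).eq_of_length h
    rw [← hde]; exact List.nodup_dedup xs
  · intro h
    rw [List.dedup_eq_self.2 h]

lemma pvBase0 (a b c e f : Int) (h1 : a < b) (h2 : b < c) (h3 : c < e) (h4 : e < f) :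
    ((0 = a ∨ 0 = b ∨ 0 = c ∨ 0 = e ∨ 0 = f) ∧ (1 = a ∨ 1 = b ∨ 1 = c ∨ 1 = e ∨ 1 = f) ∧ (2 = a ∨ 2 = b ∨ 2 = c ∨ 2 = e ∨ 2 = f) ∧ (3 = a ∨ 3 = b ∨ 3 = c ∨ 3 = e ∨ 3 = f) ∧ (4 = a ∨ 4 = b ∨ 4 = c ∨ 4 = e ∨ 4 = f)) ↔ (a = 0 ∧ b = 1 ∧ c = 2 ∧ e = 3 ∧ f = 4) := by omega

lemma pvBase1 (a b c e f : Int) (h1 : a < b) (h2 : b < c) (h3 : c < e) (h4 : e < f) :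
    ((1 = a ∨ 1 = b ∨ 1 = c ∨ 1 = e ∨ 1 = f) ∧ (2 = a ∨ 2 = b ∨ 2 = c ∨ 2 = e ∨ 2 = f) ∧ (3 = a ∨ 3 = b ∨ 3 = c ∨ 3 = e ∨ 3 = f) ∧ (4 = a ∨ 4 = b ∨ 4 = c ∨ 4 = e ∨ 4 = f) ∧ (5 = a ∨ 5 = b ∨ 5 = c ∨ 5 = e ∨ 5 = f)) ↔ (a = 1 ∧ b = 2 ∧ c = 3 ∧ e = 4 ∧ f = 5) := by omega

lemma pvBase2 (a b c e f : Int) (h1 : a < b) (h2 : b < c) (h3 : c < e) (h4 : e < f) :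
    ((2 = a ∨ 2 = b ∨ 2 = c ∨ 2 = e ∨ 2 = f) ∧ (3 = a ∨ 3 = b ∨ 3 = c ∨ 3 = e ∨ 3 = f) ∧ (4 = a ∨ 4 = b ∨ 4 = c ∨ 4 = e ∨ 4 = f) ∧ (5 = a ∨ 5 = b ∨ 5 = c ∨ 5 = e ∨ 5 = f) ∧ (6 = a ∨ 6 = b ∨ 6 = c ∨ 6 = e ∨ 6 = f)) ↔ (a = 2 ∧ b = 3 ∧ c = 4 ∧ e = 5 ∧ f = 6) := by omega

lemma pvBase3 (a b c e f : Int) (h1 : a < b) (h2 : b < c) (h3 : c < e) (h4 : e < f) :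
    ((3 = a ∨ 3 = b ∨ 3 = c ∨ 3 = e ∨ 3 = f) ∧ (4 = a ∨ 4 = b ∨ 4 = c ∨ 4 = e ∨ 4 = f) ∧ (5 = a ∨ 5 = b ∨ 5 = c ∨ 5 = e ∨ 5 = f) ∧ (6 = a ∨ 6 = b ∨ 6 = c ∨ 6 = e ∨ 6 = f) ∧ (7 = a ∨ 7 = b ∨ 7 = c ∨ 7 = e ∨ 7 = f)) ↔ (a = 3 ∧ b = 4 ∧ c = 5 ∧ e = 6 ∧ f = 7) := by omega

lemma pvBase4 (a b c e f : Int) (h1 : a < b) (h2 : b < c) (h3 : c < e) (h4 : e < f) :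
    ((4 = a ∨ 4 = b ∨ 4 = c ∨ 4 = e ∨ 4 = f) ∧ (5 = a ∨ 5 = b ∨ 5 = c ∨ 5 = e ∨ 5 = f) ∧ (6 = a ∨ 6 = b ∨ 6 = c ∨ 6 = e ∨ 6 = f) ∧ (7 = a ∨ 7 = b ∨ 7 = c ∨ 7 = e ∨ 7 = f) ∧ (8 = a ∨ 8 = b ∨ 8 = c ∨ 8 = e ∨ 8 = f)) ↔ (a = 4 ∧ b = 5 ∧ c = 6 ∧ e = 7 ∧ f = 8) := by omega

lemma pvBase5 (a b c e f : Int) (h1 : a < b) (h2 : b < c) (h3 : c < e) (h4 : e < f) :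
    ((5 = a ∨ 5 = b ∨ 5 = c ∨ 5 = e ∨ 5 = f) ∧ (6 = a ∨ 6 = b ∨ 6 = c ∨ 6 = e ∨ 6 = f) ∧ (7 = a ∨ 7 = b ∨ 7 = c ∨ 7 = e ∨ 7 = f) ∧ (8 = a ∨ 8 = b ∨ 8 = c ∨ 8 = e ∨ 8 = f) ∧ (9 = a ∨ 9 = b ∨ 9 = c ∨ 9 = e ∨ 9 = f)) ↔ (a = 5 ∧ b = 6 ∧ c = 7 ∧ e = 8 ∧ f = 9) := by omega

lemma pvBase6 (a b c e f : Int) (h1 : a < b) (h2 : b < c) (h3 : c < e) (h4 : e < f) :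
    ((6 = a ∨ 6 = b ∨ 6 = c ∨ 6 = e ∨ 6 = f) ∧ (7 = a ∨ 7 = b ∨ 7 = c ∨ 7 = e ∨ 7 = f) ∧ (8 = a ∨ 8 = b ∨ 8 = c ∨ 8 = e ∨ 8 = f) ∧ (9 = a ∨ 9 = b ∨ 9 = c ∨ 9 = e ∨ 9 = f) ∧ (0 = a ∨ 0 = b ∨ 0 = c ∨ 0 = e ∨ 0 = f)) ↔ (a = 0 ∧ b = 6 ∧ c = 7 ∧ e = 8 ∧ f = 9) := by omega

lemma pvBase7 (a b c e f : Int) (h1 : a < b) (h2 : b < c) (h3 : c < e) (h4 : e < f) :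
    ((7 = a ∨ 7 = b ∨ 7 = c ∨ 7 = e ∨ 7 = f) ∧ (8 = a ∨ 8 = b ∨ 8 = c ∨ 8 = e ∨ 8 = f) ∧ (9 = a ∨ 9 = b ∨ 9 = c ∨ 9 = e ∨ 9 = f) ∧ (0 = a ∨ 0 = b ∨ 0 = c ∨ 0 = e ∨ 0 = f) ∧ (1 = a ∨ 1 = b ∨ 1 = c ∨ 1 = e ∨ 1 = f)) ↔ (a = 0 ∧ b = 1 ∧ c = 7 ∧ e = 8 ∧ f = 9) := by omega

lemma pvBase8 (a b c e f : Int) (h1 : a < b) (h2 : b < c) (h3 : c < e) (h4 : e < f) :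
    ((8 = a ∨ 8 = b ∨ 8 = c ∨ 8 = e ∨ 8 = f) ∧ (9 = a ∨ 9 = b ∨ 9 = c ∨ 9 = e ∨ 9 = f) ∧ (0 = a ∨ 0 = b ∨ 0 = c ∨ 0 = e ∨ 0 = f) ∧ (1 = a ∨ 1 = b ∨ 1 = c ∨ 1 = e ∨ 1 = f) ∧ (2 = a ∨ 2 = b ∨ 2 = c ∨ 2 = e ∨ 2 = f)) ↔ (a = 0 ∧ b = 1 ∧ c = 2 ∧ e = 8 ∧ f = 9) := by omega

lemma pvBase9 (a b c e f : Int) (h1 : a < b) (h2 : b < c) (h3 : c < e) (h4 : e < f) :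
    ((9 = a ∨ 9 = b ∨ 9 = c ∨ 9 = e ∨ 9 = f) ∧ (0 = a ∨ 0 = b ∨ 0 = c ∨ 0 = e ∨ 0 = f) ∧ (1 = a ∨ 1 = b ∨ 1 = c ∨ 1 = e ∨ 1 = f) ∧ (2 = a ∨ 2 = b ∨ 2 = c ∨ 2 = e ∨ 2 = f) ∧ (3 = a ∨ 3 = b ∨ 3 = c ∨ 3 = e ∨ 3 = f)) ↔ (a = 0 ∧ b = 1 ∧ c = 2 ∧ e = 3 ∧ f = 9) := by omega


-- a 5-list of integers is a permutation of [1,1,1,1,6] iff one entry is 6 and the rest are 1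
lemma pvPerm5 (g1 g2 g3 g4 g5 : Int) :
    ([g1, g2, g3, g4, g5].Perm [1, 1, 1, 1, 6]) ↔
      ((g1 = 6 ∧ g2 = 1 ∧ g3 = 1 ∧ g4 = 1 ∧ g5 = 1) ∨
       (g1 = 1 ∧ g2 = 6 ∧ g3 = 1 ∧ g4 = 1 ∧ g5 = 1) ∨
       (g1 = 1 ∧ g2 = 1 ∧ g3 = 6 ∧ g4 = 1 ∧ g5 = 1) ∨
       (g1 = 1 ∧ g2 = 1 ∧ g3 = 1 ∧ g4 = 6 ∧ g5 = 1) ∨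
       (g1 = 1 ∧ g2 = 1 ∧ g3 = 1 ∧ g4 = 1 ∧ g5 = 6)) := by
  constructor
  · intro h
    have hmem : ∀ x ∈ [g1, g2, g3, g4, g5], x = 1 ∨ x = 6 := by
      intro x hx
      have hx2 : x ∈ ([1, 1, 1, 1, 6] : List Int) := h.subset hx
      simp at hx2
      tauto
    have hsum : g1 + g2 + g3 + g4 + g5 = 10 := by
      have hs : [g1, g2, g3, g4, g5].sum = ([1, 1, 1, 1, 6] : List Int).sum := h.sum_eq
      simp [List.sum_cons] at hs
      omega
    have m1 := hmem g1 (by simp)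
    have m2 := hmem g2 (by simp)
    have m3 := hmem g3 (by simp)
    have m4 := hmem g4 (by simp)
    have m5 := hmem g5 (by simp)
    rcases m1 with rfl | rfl <;> rcases m2 with rfl | rfl <;> rcases m3 with rfl | rfl <;>
      rcases m4 with rfl | rfl <;> rcases m5 with rfl | rfl <;> simp_all
  · rintro (⟨h1, h2, h3, h4, h5⟩ | ⟨h1, h2, h3, h4, h5⟩ | ⟨h1, h2, h3, h4, h5⟩ |
            ⟨h1, h2, h3, h4, h5⟩ | ⟨h1, h2, h3, h4, h5⟩) <;> subst h1 <;> subst h2 <;>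
      subst h3 <;> subst h4 <;> subst h5 <;> decide

-- ===== VERDICT (by name: the statement is the Claim_ definition above) =====
theorem isStraightMod10AnyOrder_spec : Claim_equal_isStraightMod10AnyOrder := by
  intro d _hdom
  unfold Spec_isStraightMod10AnyOrder
  by_cases hlen : d.length = 5
  · by_cases hnd : d.Nodup
    · -- both guards pass: analyse via the sorted list
      have hsetlen : (PySem.Set.ofList d).length = d.length := (pvOfListLen d).2 hnd
      have hsetc : ((PySem.Set.ofList d).length : Int) = 5 := by rw [hsetlen, hlen]; norm_num
      have hlensort : (PySem.List.sorted d (fun x => x) false).length = 5 :=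
        (PySem.List.sorted_perm d (fun x => x) false).length_eq.trans hlen
      obtain ⟨a, b, c, e, f, hsort⟩ :
          ∃ a b c e f, PySem.List.sorted d (fun x => x) false = [a, b, c, e, f] := by
        rcases hs : PySem.List.sorted d (fun x => x) false with _ | ⟨a, _ | ⟨b, _ | ⟨c, _ | ⟨e, _ | ⟨f, _ | ⟨g, t⟩⟩⟩⟩⟩⟩ <;>
          rw [hs] at hlensort <;> simp at hlensort
        exact ⟨a, b, c, e, f, rfl⟩
      have hpw : List.Pairwise (· ≤ ·) ([a, b, c, e, f] : List Int) := by
        rw [← hsort]; exact PySem.List.sorted_pairwise d (fun x => x)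
      have hndl : ([a, b, c, e, f] : List Int).Nodup := by
        rw [← hsort]; exact ((PySem.List.sorted_perm d (fun x => x) false).nodup_iff).2 hnd
      simp [List.pairwise_cons] at hpw hndl
      have h1 : a < b := by omega
      have h2 : b < c := by omega
      have h3 : c < e := by omega
      have h4 : e < f := by omega
      have hmem : ∀ x : Int, x ∈ d ↔ (x = a ∨ x = b ∨ x = c ∨ x = e ∨ x = f) := by
        intro x
        rw [← (PySem.List.sorted_perm d (fun x => x) false).mem_iff, hsort]
        simp
      have hr10 : PySem.List.pyRange 0 10 1 = [0,1,2,3,4,5,6,7,8,9] := by decide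
      have hr5 : PySem.List.pyRange 0 5 1 = [0,1,2,3,4] := by decide
      have hr4 : PySem.List.pyRange 0 4 1 = [0,1,2,3] := by decide
      have hA : isStraightMod10AnyOrder d = true ↔
          (((0 = a ∨ 0 = b ∨ 0 = c ∨ 0 = e ∨ 0 = f) ∧ (1 = a ∨ 1 = b ∨ 1 = c ∨ 1 = e ∨ 1 = f) ∧ (2 = a ∨ 2 = b ∨ 2 = c ∨ 2 = e ∨ 2 = f) ∧ (3 = a ∨ 3 = b ∨ 3 = c ∨ 3 = e ∨ 3 = f) ∧ (4 = a ∨ 4 = b ∨ 4 = c ∨ 4 = e ∨ 4 = f)) ∨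
        ((1 = a ∨ 1 = b ∨ 1 = c ∨ 1 = e ∨ 1 = f) ∧ (2 = a ∨ 2 = b ∨ 2 = c ∨ 2 = e ∨ 2 = f) ∧ (3 = a ∨ 3 = b ∨ 3 = c ∨ 3 = e ∨ 3 = f) ∧ (4 = a ∨ 4 = b ∨ 4 = c ∨ 4 = e ∨ 4 = f) ∧ (5 = a ∨ 5 = b ∨ 5 = c ∨ 5 = e ∨ 5 = f)) ∨
        ((2 = a ∨ 2 = b ∨ 2 = c ∨ 2 = e ∨ 2 = f) ∧ (3 = a ∨ 3 = b ∨ 3 = c ∨ 3 = e ∨ 3 = f) ∧ (4 = a ∨ 4 = b ∨ 4 = c ∨ 4 = e ∨ 4 = f) ∧ (5 = a ∨ 5 = b ∨ 5 = c ∨ 5 = e ∨ 5 = f) ∧ (6 = a ∨ 6 = b ∨ 6 = c ∨ 6 = e ∨ 6 = f)) ∨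
        ((3 = a ∨ 3 = b ∨ 3 = c ∨ 3 = e ∨ 3 = f) ∧ (4 = a ∨ 4 = b ∨ 4 = c ∨ 4 = e ∨ 4 = f) ∧ (5 = a ∨ 5 = b ∨ 5 = c ∨ 5 = e ∨ 5 = f) ∧ (6 = a ∨ 6 = b ∨ 6 = c ∨ 6 = e ∨ 6 = f) ∧ (7 = a ∨ 7 = b ∨ 7 = c ∨ 7 = e ∨ 7 = f)) ∨
        ((4 = a ∨ 4 = b ∨ 4 = c ∨ 4 = e ∨ 4 = f) ∧ (5 = a ∨ 5 = b ∨ 5 = c ∨ 5 = e ∨ 5 = f) ∧ (6 = a ∨ 6 = b ∨ 6 = c ∨ 6 = e ∨ 6 = f) ∧ (7 = a ∨ 7 = b ∨ 7 = c ∨ 7 = e ∨ 7 = f) ∧ (8 = a ∨ 8 = b ∨ 8 = c ∨ 8 = e ∨ 8 = f)) ∨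
        ((5 = a ∨ 5 = b ∨ 5 = c ∨ 5 = e ∨ 5 = f) ∧ (6 = a ∨ 6 = b ∨ 6 = c ∨ 6 = e ∨ 6 = f) ∧ (7 = a ∨ 7 = b ∨ 7 = c ∨ 7 = e ∨ 7 = f) ∧ (8 = a ∨ 8 = b ∨ 8 = c ∨ 8 = e ∨ 8 = f) ∧ (9 = a ∨ 9 = b ∨ 9 = c ∨ 9 = e ∨ 9 = f)) ∨
        ((6 = a ∨ 6 = b ∨ 6 = c ∨ 6 = e ∨ 6 = f) ∧ (7 = a ∨ 7 = b ∨ 7 = c ∨ 7 = e ∨ 7 = f) ∧ (8 = a ∨ 8 = b ∨ 8 = c ∨ 8 = e ∨ 8 = f) ∧ (9 = a ∨ 9 = b ∨ 9 = c ∨ 9 = e ∨ 9 = f) ∧ (0 = a ∨ 0 = b ∨ 0 = c ∨ 0 = e ∨ 0 = f)) ∨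
        ((7 = a ∨ 7 = b ∨ 7 = c ∨ 7 = e ∨ 7 = f) ∧ (8 = a ∨ 8 = b ∨ 8 = c ∨ 8 = e ∨ 8 = f) ∧ (9 = a ∨ 9 = b ∨ 9 = c ∨ 9 = e ∨ 9 = f) ∧ (0 = a ∨ 0 = b ∨ 0 = c ∨ 0 = e ∨ 0 = f) ∧ (1 = a ∨ 1 = b ∨ 1 = c ∨ 1 = e ∨ 1 = f)) ∨
        ((8 = a ∨ 8 = b ∨ 8 = c ∨ 8 = e ∨ 8 = f) ∧ (9 = a ∨ 9 = b ∨ 9 = c ∨ 9 = e ∨ 9 = f) ∧ (0 = a ∨ 0 = b ∨ 0 = c ∨ 0 = e ∨ 0 = f) ∧ (1 = a ∨ 1 = b ∨ 1 = c ∨ 1 = e ∨ 1 = f) ∧ (2 = a ∨ 2 = b ∨ 2 = c ∨ 2 = e ∨ 2 = f)) ∨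
        ((9 = a ∨ 9 = b ∨ 9 = c ∨ 9 = e ∨ 9 = f) ∧ (0 = a ∨ 0 = b ∨ 0 = c ∨ 0 = e ∨ 0 = f) ∧ (1 = a ∨ 1 = b ∨ 1 = c ∨ 1 = e ∨ 1 = f) ∧ (2 = a ∨ 2 = b ∨ 2 = c ∨ 2 = e ∨ 2 = f) ∧ (3 = a ∨ 3 = b ∨ 3 = c ∨ 3 = e ∨ 3 = f))) := by
        simp [isStraightMod10AnyOrder, hlen, hsetc, hr10, hr5, hmem]
      rw [pvBase0 a b c e f h1 h2 h3 h4, pvBase1 a b c e f h1 h2 h3 h4, pvBase2 a b c e f h1 h2 h3 h4, pvBase3 a b c e f h1 h2 h3 h4, pvBase4 a b c e f h1 h2 h3 h4, pvBase5 a b c e f h1 h2 h3 h4, pvBase6 a b c e f h1 h2 h3 h4, pvBase7 a b c e f h1 h2 h3 h4, pvBase8 a b c e f h1 h2 h3 h4, pvBase9 a b c e f h1 h2 h3 h4] at hA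
      have hsg : ∀ g1 g2 g3 g4 g5 : Int,
          (PySem.List.sorted [g1, g2, g3, g4, g5] (fun x => x) false = [1, 1, 1, 1, 6]) ↔
            [g1, g2, g3, g4, g5].Perm [1, 1, 1, 1, 6] := by
        intro g1 g2 g3 g4 g5
        rw [show ([1,1,1,1,6] : List Int) = PySem.List.sorted [1,1,1,1,6] (fun x => x) false from by decide]
        exact PySem.List.sorted_id_eq_sorted_id_iff_perm _ _
      have hB : isStraightMod10AnyOrder_alt d = true ↔
          (((0 ≤ a ∧ a ≤ 9) ∧ (0 ≤ b ∧ b ≤ 9) ∧ (0 ≤ c ∧ c ≤ 9) ∧ (0 ≤ e ∧ e ≤ 9) ∧ 0 ≤ f ∧ f ≤ 9) ∧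
            [b - a, c - b, e - c, f - e, 10 - f + a].Perm [1, 1, 1, 1, 6]) := by
        simp [isStraightMod10AnyOrder_alt, hlen, hsetc, hr4, hsort, hmem,
          PySem.List.pyGetD, PySem.List.pyGet?, PySem.List.pyIdx?, hsg]
      rw [pvPerm5] at hB
      rw [Bool.eq_iff_iff, hA, hB]
      constructor
      · rintro (⟨rfl, rfl, rfl, rfl, rfl⟩ | ⟨rfl, rfl, rfl, rfl, rfl⟩ | ⟨rfl, rfl, rfl, rfl, rfl⟩ |
                ⟨rfl, rfl, rfl, rfl, rfl⟩ | ⟨rfl, rfl, rfl, rfl, rfl⟩ | ⟨rfl, rfl, rfl, rfl, rfl⟩ |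
                ⟨rfl, rfl, rfl, rfl, rfl⟩ | ⟨rfl, rfl, rfl, rfl, rfl⟩ | ⟨rfl, rfl, rfl, rfl, rfl⟩ |
                ⟨rfl, rfl, rfl, rfl, rfl⟩) <;> exact ⟨by norm_num, by norm_num⟩
      · rintro ⟨⟨⟨ha0, ha9⟩, ⟨hb0, hb9⟩, ⟨hc0, hc9⟩, ⟨he0, he9⟩, hf0, hf9⟩,
          (⟨g1, g2, g3, g4, g5⟩ | ⟨g1, g2, g3, g4, g5⟩ | ⟨g1, g2, g3, g4, g5⟩ |
           ⟨g1, g2, g3, g4, g5⟩ | ⟨g1, g2, g3, g4, g5⟩)⟩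
        · -- gap of 6 between a and b: digits 0,6,7,8,9
          have pf : a = 0 ∧ b = 6 ∧ c = 7 ∧ e = 8 ∧ f = 9 := by omega
          exact Or.inr (Or.inr (Or.inr (Or.inr (Or.inr (Or.inr (Or.inl pf))))))
        · -- gap of 6 between b and c: digits 0,1,7,8,9
          have pf : a = 0 ∧ b = 1 ∧ c = 7 ∧ e = 8 ∧ f = 9 := by omega
          exact Or.inr (Or.inr (Or.inr (Or.inr (Or.inr (Or.inr (Or.inr (Or.inl pf)))))))
        · -- gap of 6 between c and e: digits 0,1,2,8,9
          have pf : a = 0 ∧ b = 1 ∧ c = 2 ∧ e = 8 ∧ f = 9 := by omega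
          exact Or.inr (Or.inr (Or.inr (Or.inr (Or.inr (Or.inr (Or.inr (Or.inr (Or.inl pf))))))))
        · -- gap of 6 between e and f: digits 0,1,2,3,9
          have pf : a = 0 ∧ b = 1 ∧ c = 2 ∧ e = 3 ∧ f = 9 := by omega
          exact Or.inr (Or.inr (Or.inr (Or.inr (Or.inr (Or.inr (Or.inr (Or.inr (Or.inr (pf)))))))))
        · -- wrap gap of 6: consecutive run a, a+1, …, a+4 with 0 ≤ a ≤ 5
          have ha5 : a ≤ 5 := by omega
          interval_cases a
          · exact Or.inl (by omega)
          · exact Or.inr (Or.inl (by omega))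
          · exact Or.inr (Or.inr (Or.inl (by omega)))
          · exact Or.inr (Or.inr (Or.inr (Or.inl (by omega))))
          · exact Or.inr (Or.inr (Or.inr (Or.inr (Or.inl (by omega)))))
          · exact Or.inr (Or.inr (Or.inr (Or.inr (Or.inr (Or.inl (by omega))))))
    · -- duplicate elements: both return false at the set-size guard
      have hsetc : ((PySem.Set.ofList d).length : Int) ≠ 5 := by
        intro h
        have : (PySem.Set.ofList d).length = 5 := by exact_mod_cast h
        exact hnd ((pvOfListLen d).1 (this.trans hlen.symm))
      simp [isStraightMod10AnyOrder, isStraightMod10AnyOrder_alt, hlen, hsetc]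
  · simp [isStraightMod10AnyOrder, isStraightMod10AnyOrder_alt, hlen]
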